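-- pv_equiv track=rewrite | github.com/luke-feng/IoT_Sensors_Security_Analysis | get_features.py | find_all_head
-- ===== SOURCE A (Python) =====
-- def find_all_head(trace, head):
--     starts, ends,se = [], [], []
--
--     for i,s in enumerate(trace):
--         if s == head:
--             start=i
--             starts.append(start)
--             if len(starts) > 1:
--                 end = starts[-1]
--                 ends.append(end)
--         if i == len(trace)-1:
--             end = len(trace)
--             ends.append(end)
--     se = [(starts[i], ends[i]) for i in range(0, len(starts))]
--     return se
-- ===== SOURCE B (Python) =====
-- def find_all_head(trace, head):
--     res = []
--     nxt = len(trace)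
--     for i, s in reversed(list(enumerate(trace))):
--         if s == head:
--             res.append((i, nxt))
--             nxt = i
--     res.reverse()
--     return res
-- ===== Notes on version B (the rewrite author's own statement) =====
-- stated objective: alternative
-- what changed: Replaces A's forward pass with parallel starts/ends lists plus an index-zipping comprehension by a single backward traversal that carries the next interval boundary in one variable, emitting intervals back-to-front and reversing once.
import Mathlib
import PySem

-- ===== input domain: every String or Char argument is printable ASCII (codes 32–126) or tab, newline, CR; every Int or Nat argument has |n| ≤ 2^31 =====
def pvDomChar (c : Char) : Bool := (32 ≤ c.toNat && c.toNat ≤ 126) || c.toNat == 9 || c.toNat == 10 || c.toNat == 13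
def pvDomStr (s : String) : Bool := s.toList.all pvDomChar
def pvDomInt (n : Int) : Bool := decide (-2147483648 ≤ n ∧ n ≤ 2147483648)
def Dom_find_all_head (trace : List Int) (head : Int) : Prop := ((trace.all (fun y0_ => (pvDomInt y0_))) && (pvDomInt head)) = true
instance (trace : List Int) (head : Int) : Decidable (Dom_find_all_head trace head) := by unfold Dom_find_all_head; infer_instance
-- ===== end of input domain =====

-- B replaces A's forward pass with parallel starts/ends lists by one backward
-- traversal carrying the next boundary in a single variable (alternative decomposition);
-- proven to return the same list on every input.


-- ===== PORT A =====
-- the body of A's for-loop over enumerate(trace), as a named helper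
def stepA (trace : List Int) (head : Int) (st : List Int × List Int) (p : Int × Int) : List Int × List Int :=
  let starts := if p.2 = head then st.1 ++ [p.1] else st.1
  let ends := if p.2 = head ∧ starts.length > 1
              then st.2 ++ [PySem.List.pyGetD starts (-1) 0] else st.2
  let ends := if p.1 = (trace.length : Int) - 1
              then ends ++ [(trace.length : Int)] else ends
  (starts, ends)

-- one pass over enumerate(trace) maintaining (starts, ends); then zip by index
def find_all_head (trace : List Int) (head : Int) : List (Int × Int) :=
  let st := (PySem.List.enumerate trace 0).foldl (stepA trace head) ([], [])
  (PySem.List.pyRange 0 st.1.length 1).map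
    (fun i => (PySem.List.pyGetD st.1 i 0, PySem.List.pyGetD st.2 i 0))

-- ===== PORT B =====
-- the body of B's for-loop over reversed(list(enumerate(trace)))
def stepB (head : Int) (st : List (Int × Int) × Int) (p : Int × Int) : List (Int × Int) × Int :=
  if p.2 = head then (st.1 ++ [(p.1, st.2)], p.1) else st

-- backward pass carrying the next boundary nxt; append intervals, reverse at the end
def find_all_head_alt (trace : List Int) (head : Int) : List (Int × Int) :=
  let st := ((PySem.List.enumerate trace 0).reverse).foldl (stepB head) ([], (trace.length : Int))
  st.1.reverse

-- ===== PRECONDITION & SPEC =====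
def Spec_find_all_head (trace : List Int) (head : Int) (out : List (Int × Int)) : Prop := out = find_all_head_alt trace head
instance (trace : List Int) (head : Int) (out : List (Int × Int)) : Decidable (Spec_find_all_head trace head out) := by unfold Spec_find_all_head; infer_instance

-- ===== CLAIM (what is proved, stated in full; the proofs are below) =====
def Claim_equal_find_all_head : Prop := ∀ (trace : List Int) (head : Int), Dom_find_all_head trace head → Spec_find_all_head trace head (find_all_head trace head)

-- ===== LEMMAS AND PROOFS =====

-- positions of head in l, indices starting at s
def pvPos (head : Int) (l : List Int) (s : Int) : List Int :=
  (PySem.List.enumerate l s).filterMap (fun p => if p.2 = head then some p.1 else none)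

-- pair each position with the next one (or the final boundary e)
def pairUp : List Int → Int → List (Int × Int)
  | [], _ => []
  | p :: ps, e => (p, ps.headD e) :: pairUp ps e

lemma pvPos_nil (head : Int) (s : Int) : pvPos head [] s = [] := rfl

lemma pvPos_cons (head x : Int) (l : List Int) (s : Int) :
    pvPos head (x :: l) s = (if x = head then [s] else []) ++ pvPos head l (s + 1) := by
  simp only [pvPos, PySem.List.enumerate_cons, List.filterMap_cons]
  split_ifs with hx <;> simp

-- Characterisation of A's fold, generalized over suffix and accumulator.
lemma foldA_char (trace : List Int) (head : Int) :
    ∀ (l : List Int) (s : Int) (a e : List Int),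
      s + l.length = (trace.length : Int) →
      (PySem.List.enumerate l s).foldl (stepA trace head) (a, e)
      = (a ++ pvPos head l s,
         e ++ (if a = [] then (pvPos head l s).drop 1 else pvPos head l s)
           ++ (if l = [] then [] else [(trace.length : Int)])) := by
  intro l
  induction l with
  | nil => intro s a e h; simp [pvPos_nil, PySem.List.enumerate_nil]
  | cons x l ih =>
    intro s a e h
    have hlast : (s = (trace.length : Int) - 1) ↔ (l = []) := by
      constructor
      · intro hs
        have : (l.length : Int) = 0 := by simp at h; omega
        exact List.length_eq_zero_iff.mp (by exact_mod_cast this)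
      · intro hl; subst hl; simp at h ⊢; omega
    rw [PySem.List.enumerate_cons, List.foldl_cons]
    by_cases hl : l = []
    · -- x is the last element of trace
      subst hl
      have hs : s = (trace.length : Int) - 1 := hlast.mpr rfl
      by_cases hx : x = head
      · by_cases ha : a = []
        · subst ha
          have key : stepA trace head ([], e) (s, x) = ([s], e ++ [(trace.length : Int)]) := by
            simp [stepA, hx, hs]
          rw [key, PySem.List.enumerate_nil, List.foldl_nil]
          simp [pvPos_cons, pvPos_nil, hx]
        · have key : stepA trace head (a, e) (s, x)
              = (a ++ [s], e ++ [s] ++ [(trace.length : Int)]) := by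
            cases a with
            | nil => exact absurd rfl ha
            | cons y ys =>
              simp [stepA, hx, hs]
              rw [← List.cons_append, PySem.List.pyGetD_neg_one_append_singleton]
          rw [key, PySem.List.enumerate_nil, List.foldl_nil]
          simp [pvPos_cons, pvPos_nil, hx, ha]
      · have key : stepA trace head (a, e) (s, x) = (a, e ++ [(trace.length : Int)]) := by
          simp [stepA, hx, hs]
        rw [key, PySem.List.enumerate_nil, List.foldl_nil]
        simp [pvPos_cons, pvPos_nil, hx]
    · -- x is not the last element
      have hs : ¬ (s = (trace.length : Int) - 1) := fun hc => hl (hlast.mp hc)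
      have hlen' : (s + 1) + (l.length : Int) = (trace.length : Int) := by
        simp at h; omega
      by_cases hx : x = head
      · by_cases ha : a = []
        · subst ha
          have key : stepA trace head ([], e) (s, x) = ([s], e) := by
            simp [stepA, hx, hs]
          rw [key, ih (s + 1) [s] e hlen']
          simp [pvPos_cons, hx, hl]
        · have key : stepA trace head (a, e) (s, x) = (a ++ [s], e ++ [s]) := by
            cases a with
            | nil => exact absurd rfl ha
            | cons y ys =>
              simp [stepA, hx, hs]
              rw [← List.cons_append, PySem.List.pyGetD_neg_one_append_singleton]
          rw [key, ih (s + 1) (a ++ [s]) (e ++ [s]) hlen']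
          simp [pvPos_cons, hx, hl, ha]
      · have key : stepA trace head (a, e) (s, x) = (a, e) := by
          simp [stepA, hx, hs]
        rw [key, ih (s + 1) a e hlen']
        simp [pvPos_cons, hx, hl]

-- A's final index-comprehension is a zip (u.length ≤ v.length)
lemma map_range_zip (u v : List Int) (h : u.length ≤ v.length) :
    (PySem.List.pyRange 0 (u.length : Int) 1).map
      (fun i => (PySem.List.pyGetD u i 0, PySem.List.pyGetD v i 0)) = u.zip v := by
  apply List.ext_getElem
  · simp [PySem.List.length_pyRange_one]; omega
  · intro k h1 h2
    have hk : k < u.length := by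
      simpa [PySem.List.length_pyRange_one] using h1
    have hkv : k < v.length := lt_of_lt_of_le hk h
    rw [List.getElem_map, PySem.List.getElem_pyRange_one, List.getElem_zip]
    have hcast : (0 : Int) + (k : Int) = ((k : ℕ) : Int) := by ring
    rw [hcast, PySem.List.pyGetD_natCast, PySem.List.pyGetD_natCast,
      List.getD_eq_getElem _ _ hk, List.getD_eq_getElem _ _ hkv]

-- zipping positions with their tail-plus-boundary is pairUp
lemma zip_pairUp (P : List Int) (e : Int) :
    P.zip (P.drop 1 ++ [e]) = pairUp P e := by
  induction P with
  | nil => rfl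
  | cons p ps ih =>
    cases ps with
    | nil => rfl
    | cons q qs => simpa [pairUp] using ih

-- Characterisation of B's fold, generalized over suffix and accumulator.
lemma foldB_char (head : Int) :
    ∀ (l : List Int) (s : Int) (res : List (Int × Int)) (nxt : Int),
      ((PySem.List.enumerate l s).reverse).foldl (stepB head) (res, nxt)
      = (res ++ (pairUp (pvPos head l s) nxt).reverse, (pvPos head l s).headD nxt) := by
  intro l
  induction l with
  | nil => intro s res nxt; simp [PySem.List.enumerate_nil, pvPos_nil, pairUp]
  | cons x l ih =>
    intro s res nxt
    rw [PySem.List.enumerate_cons, List.reverse_cons, List.foldl_append,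
      ih (s + 1) res nxt, List.foldl_cons, List.foldl_nil]
    by_cases hx : x = head
    · have key : stepB head
          (res ++ (pairUp (pvPos head l (s + 1)) nxt).reverse, (pvPos head l (s + 1)).headD nxt)
          (s, x)
          = (res ++ (pairUp (pvPos head l (s + 1)) nxt).reverse
              ++ [(s, (pvPos head l (s + 1)).headD nxt)], s) := by
        simp [stepB, hx]
      rw [key]
      simp [pvPos_cons, hx, pairUp]
    · have key : stepB head
          (res ++ (pairUp (pvPos head l (s + 1)) nxt).reverse, (pvPos head l (s + 1)).headD nxt)
          (s, x)
          = (res ++ (pairUp (pvPos head l (s + 1)) nxt).reverse, (pvPos head l (s + 1)).headD nxt) := by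
        simp [stepB, hx]
      rw [key]
      simp [pvPos_cons, hx]

-- B computes pairUp of the positions with the trace length
lemma alt_eq_pairUp (trace : List Int) (head : Int) :
    find_all_head_alt trace head = pairUp (pvPos head trace 0) (trace.length : Int) := by
  show (((PySem.List.enumerate trace 0).reverse).foldl (stepB head)
      ([], (trace.length : Int))).1.reverse = _
  rw [foldB_char head trace 0 [] (trace.length : Int)]
  simp

-- A computes pairUp of the positions with the trace length
lemma a_eq_pairUp (trace : List Int) (head : Int) :
    find_all_head trace head = pairUp (pvPos head trace 0) (trace.length : Int) := by
  show (PySem.List.pyRange 0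
      (((PySem.List.enumerate trace 0).foldl (stepA trace head) ([], [])).1.length) 1).map
      (fun i => (PySem.List.pyGetD ((PySem.List.enumerate trace 0).foldl (stepA trace head) ([], [])).1 i 0,
                 PySem.List.pyGetD ((PySem.List.enumerate trace 0).foldl (stepA trace head) ([], [])).2 i 0))
    = _
  rw [foldA_char trace head trace 0 [] [] (by simp)]
  simp only [List.nil_append, reduceIte]
  by_cases htr : trace = []
  · subst htr
    have hP0 : pvPos head [] 0 = [] := rfl
    simp [hP0, pairUp]
  · rw [if_neg htr,
      map_range_zip (pvPos head trace 0) ((pvPos head trace 0).drop 1 ++ [(trace.length : Int)])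
        (by cases pvPos head trace 0 <;> simp),
      zip_pairUp]

-- ===== VERDICT (by name: the statement is the Claim_ definition above) =====
theorem find_all_head_spec : Claim_equal_find_all_head := by
  intro trace head _
  unfold Spec_find_all_head
  rw [a_eq_pairUp, alt_eq_pairUp]
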